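-- pv_equiv track=rewrite | github.com/simiyub/python | interview/practice/code/graphs/MinimumPassesToAllPositiveMatrix.py | convert_negatives
-- ===== SOURCE A (Python) =====
-- def indices_of_positive_values(matrix):
--     indices = []
--     for row in range(len(matrix)):
--         for col in range(len(matrix[row])):
--             value = matrix[row][col]
--             if value > 0:
--                 indices.append([row, col])
--     return indices
--
-- def adjacent_positions(row, col, matrix):
--     positions = []
--
--     if row > 0 :
--         positions.append([row - 1, col])
--     if row < len(matrix) - 1:
--         positions.append([row + 1, col])
--     if col > 0:
--         positions.append([row, col - 1])
--     if col < len(matrix[0]) - 1 :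
--         positions.append([row, col + 1])
--     return positions
--
-- def convert_negatives(matrix):
--     queue = indices_of_positive_values(matrix)
--     passes = 0
--     while len(queue) > 0:
--         size = len(queue)
--         while size > 0:
--             row, col = queue.pop(0)
--             positions = adjacent_positions(row, col, matrix)
--             for position in positions:
--                 row, col = position
--                 value = matrix[row][col]
--                 if value < 0:
--                     matrix[row][col] *= -1
--                     queue.append([row, col])
--             size -= 1
--         passes += 1
--     return passes
-- ===== SOURCE B (Python) =====
-- def convert_negatives(matrix):
--     # Queue-free round relaxation: each round flips every negative cell that has a
--     # positive orthogonal neighbour in the snapshot taken at the start of the round.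
--     # Pure: builds new rows instead of mutating the input.
--     if not any(v > 0 for row in matrix for v in row):
--         return 0
--     m = matrix
--     passes = 0
--     while True:
--         flips = [(r, c)
--                  for r in range(len(m))
--                  for c in range(len(m[r]))
--                  if m[r][c] < 0 and any(
--                      0 <= nr < len(m) and 0 <= nc < len(m[nr]) and m[nr][nc] > 0
--                      for nr, nc in ((r - 1, c), (r + 1, c), (r, c - 1), (r, c + 1)))]
--         passes += 1
--         if not flips:
--             return passes
--         fl = set(flips)
--         m = [[-v if (r, c) in fl else v for c, v in enumerate(row)]
--              for r, row in enumerate(m)]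
-- ===== Notes on version B (the rewrite author's own statement) =====
-- stated objective: simpler
-- what changed: A's explicit BFS queue (pop(0)/append with in-place matrix mutation) is replaced by queue-free rounds: each round scans the whole matrix once against a start-of-round snapshot, flips every negative cell with a positive orthogonal neighbour, and counts rounds until an empty one.
-- outside the precondition, e.g. on convert_negatives([[1], [-1, -1]]): A returns 2, B returns 3
import Mathlib
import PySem

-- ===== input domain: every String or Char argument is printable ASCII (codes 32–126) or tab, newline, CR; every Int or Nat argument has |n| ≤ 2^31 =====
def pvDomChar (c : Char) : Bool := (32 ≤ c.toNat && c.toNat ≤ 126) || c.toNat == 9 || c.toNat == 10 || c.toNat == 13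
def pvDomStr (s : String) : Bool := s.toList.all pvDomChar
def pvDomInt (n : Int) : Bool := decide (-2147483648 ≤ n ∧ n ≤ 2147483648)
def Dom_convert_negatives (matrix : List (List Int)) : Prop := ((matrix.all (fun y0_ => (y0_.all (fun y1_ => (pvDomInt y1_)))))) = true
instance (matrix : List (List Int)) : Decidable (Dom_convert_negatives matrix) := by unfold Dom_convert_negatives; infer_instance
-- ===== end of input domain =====

-- B replaces A's BFS queue by whole-matrix rounds (flip every negative with a positive
-- orthogonal neighbour, per-round snapshot) — objective: simpler.  Python A mutates its
-- argument in place (flips the negatives); B is pure; the equivalence proved here is about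
-- the RETURN value only.

-- ===== PORT A =====
-- shared cell read: matrix[r][c]; exact for the nonnegative in-range indices both programs
-- generate under Pre_ (rectangular matrices); the 0 default stands for Python's IndexError
-- cases, which Pre_ excludes (and B's own reads are all bounds-guarded).
def getCell (m : List (List Int)) (r c : Int) : Int :=
  if 0 ≤ r ∧ 0 ≤ c then (m.getD r.toNat []).getD c.toNat 0 else 0

-- matrix[r][c] = v (in-place assignment; only reached with in-range indices under Pre_)
def setCell (m : List (List Int)) (r c v : Int) : List (List Int) :=
  m.set r.toNat ((m.getD r.toNat []).set c.toNat v)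

-- number of strictly negative cells; used only as the fuel bound making the loops total
def negCount (m : List (List Int)) : Nat :=
  (m.map (fun row => (row.filter (fun v => decide (v < 0))).length)).sum

def indices_of_positive_values (matrix : List (List Int)) : List (Int × Int) :=
  (PySem.List.pyRange 0 (matrix.length : Int) 1).foldl (fun ind r =>
    (PySem.List.pyRange 0 ((PySem.List.pyGetD matrix r []).length : Int) 1).foldl (fun ind2 c =>
      if getCell matrix r c > 0 then ind2 ++ [(r, c)] else ind2) ind) []

-- len(matrix[0]): Python raises on an empty matrix, but A only calls this with a nonempty
-- queue, hence a nonempty matrix; the [] default is never read on inputs A returns on.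
def adjacent_positions (row col : Int) (matrix : List (List Int)) : List (Int × Int) :=
  let p1 : List (Int × Int) := if row > 0 then [(row - 1, col)] else []
  let p2 := if row < (matrix.length : Int) - 1 then p1 ++ [(row + 1, col)] else p1
  let p3 := if col > 0 then p2 ++ [(row, col - 1)] else p2
  if col < ((PySem.List.pyGetD matrix 0 []).length : Int) - 1 then p3 ++ [(row, col + 1)] else p3

-- one queue.pop(0) plus the for-loop over its adjacent positions
def processOne (m : List (List Int)) (q : List (Int × Int)) :
    List (List Int) × List (Int × Int) :=
  match q with
  | [] => (m, [])   -- unreachable: Python pops exactly size ≤ len(queue) items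
  | (row, col) :: rest =>
    (adjacent_positions row col m).foldl
      (fun st pos =>
        let v := getCell st.1 pos.1 pos.2
        if v < 0 then (setCell st.1 pos.1 pos.2 (v * -1), st.2 ++ [pos]) else st)
      (m, rest)

-- the inner 'while size > 0' loop
def processLevel : Nat → List (List Int) → List (Int × Int) →
    List (List Int) × List (Int × Int)
  | 0, m, q => (m, q)
  | n + 1, m, q =>
    let st := processOne m q
    processLevel n st.1 st.2

-- the outer 'while len(queue) > 0' loop; the fuel only makes the recursion total and is
-- never exhausted on inputs satisfying Pre_ (each level strictly reduces negCount + length)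
def outerLoop : Nat → List (List Int) → List (Int × Int) → Int → Int
  | 0, _, _, passes => passes
  | fuel + 1, matrix, queue, passes =>
    if queue.length > 0 then
      let st := processLevel queue.length matrix queue
      outerLoop fuel st.1 st.2 (passes + 1)
    else passes

def convert_negatives (matrix : List (List Int)) : Int :=
  let queue := indices_of_positive_values matrix
  outerLoop (negCount matrix + queue.length + 1) matrix queue 0

-- ===== PORT B =====
-- any(m[nr][nc] > 0 for (nr,nc) in … if 0 <= nr < len(m) and 0 <= nc < len(m[nr]))
def hasPosNeighbor (m : List (List Int)) (r c : Int) : Bool :=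
  [(r - 1, c), (r + 1, c), (r, c - 1), (r, c + 1)].any fun p =>
    decide (0 ≤ p.1) && decide (p.1 < (m.length : Int)) && decide (0 ≤ p.2) &&
      decide (p.2 < ((PySem.List.pyGetD m p.1 []).length : Int)) &&
      decide (getCell m p.1 p.2 > 0)

-- the flips comprehension (row-major)
def collectFlips (m : List (List Int)) : List (Int × Int) :=
  (PySem.List.pyRange 0 (m.length : Int) 1).foldl (fun acc r =>
    (PySem.List.pyRange 0 ((PySem.List.pyGetD m r []).length : Int) 1).foldl (fun acc2 c =>
      if getCell m r c < 0 ∧ hasPosNeighbor m r c then acc2 ++ [(r, c)] else acc2) acc) []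

-- the rebuild comprehension [[-v if (r,c) in flips else v …] …]
def applyFlips (m : List (List Int)) (fl : List (Int × Int)) : List (List Int) :=
  (PySem.List.enumerate m).map fun rrow =>
    (PySem.List.enumerate rrow.2).map fun cv =>
      if (rrow.1, cv.1) ∈ fl then -cv.2 else cv.2

-- the 'while True' loop; fuel only for totality, never exhausted (each flipped round
-- strictly reduces negCount)
def altLoop : Nat → List (List Int) → Int → Int
  | 0, _, passes => passes
  | fuel + 1, m, passes =>
    let flips := collectFlips m
    if flips = [] then passes + 1
    else altLoop fuel (applyFlips m (PySem.Set.ofList flips)) (passes + 1)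

def convert_negatives_alt (matrix : List (List Int)) : Int :=
  if matrix.any (fun row => row.any (fun v => v > 0)) then
    altLoop (negCount matrix + 1) matrix 0
  else 0

-- ===== PRECONDITION & SPEC =====
-- Pre_ excludes ragged (non-rectangular) inputs: there A either raises IndexError (reading
-- matrix[r][c] past a short row) or, when propagation happens to stop first, returns a pass
-- count computed against row 0's width while B honours each row's own width (see cites).
def Pre_convert_negatives (matrix : List (List Int)) : Prop :=
  ∀ row ∈ matrix, row.length = (matrix.headD []).length
instance (matrix : List (List Int)) : Decidable (Pre_convert_negatives matrix) := by
  unfold Pre_convert_negatives; infer_instance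

def pvWitness_convert_negatives : List (List Int) := [[1, -1], [-2, 3]]

def Spec_convert_negatives (matrix : List (List Int)) (out : Int) : Prop := out = convert_negatives_alt matrix
instance (matrix : List (List Int)) (out : Int) : Decidable (Spec_convert_negatives matrix out) := by unfold Spec_convert_negatives; infer_instance

-- ===== CLAIM (what is proved, stated in full; the proofs are below) =====
def Claim_equal_convert_negatives : Prop := ∀ (matrix : List (List Int)), Dom_convert_negatives matrix → Pre_convert_negatives matrix → Spec_convert_negatives matrix (convert_negatives matrix)

-- ===== LEMMAS AND PROOFS =====


-- helper predicates used only by the proofs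

-- in-bounds (nonnegative, inside the matrix and inside its row)
def InB (m : List (List Int)) (p : Int × Int) : Prop :=
  0 ≤ p.1 ∧ p.1 < (m.length : Int) ∧ 0 ≤ p.2 ∧ p.2 < ((m.getD p.1.toNat []).length : Int)

-- orthogonal adjacency of two cells
def AdjP (p s : Int × Int) : Prop :=
  (p.1 = s.1 - 1 ∧ p.2 = s.2) ∨ (p.1 = s.1 + 1 ∧ p.2 = s.2) ∨
    (p.1 = s.1 ∧ p.2 = s.2 - 1) ∨ (p.1 = s.1 ∧ p.2 = s.2 + 1)

-- equal dimensions
def SameShape (m m' : List (List Int)) : Prop :=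
  m.length = m'.length ∧ ∀ i : Nat, (m.getD i []).length = (m'.getD i []).length

-- the set of cells one level of A's BFS flips: negative cells adjacent to a queue member
def FlipSet (m : List (List Int)) (q : List (Int × Int)) (p : Int × Int) : Prop :=
  getCell m p.1 p.2 < 0 ∧ ∃ s ∈ q, p ∈ adjacent_positions s.1 s.2 m

-- every queue member is positive
def QInv (m : List (List Int)) (q : List (Int × Int)) : Prop :=
  ∀ s ∈ q, getCell m s.1 s.2 > 0

-- every positive neighbour of a still-negative cell is in the queue
def KeyInv (m : List (List Int)) (q : List (Int × Int)) : Prop :=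
  ∀ p, getCell m p.1 p.2 < 0 → ∀ s, AdjP s p → getCell m s.1 s.2 > 0 → s ∈ q

lemma inB_def {m : List (List Int)} {r c : Int} :
    InB m (r, c) ↔
      0 ≤ r ∧ r < (m.length : Int) ∧ 0 ≤ c ∧ c < ((m.getD r.toNat []).length : Int) :=
  Iff.rfl

lemma adjP_symm {p s : Int × Int} (h : AdjP p s) : AdjP s p := by
  unfold AdjP at *; omega

lemma sameShape_trans {a b c : List (List Int)} (h1 : SameShape a b) (h2 : SameShape b c) :
    SameShape a c := ⟨h1.1.trans h2.1, fun i => (h1.2 i).trans (h2.2 i)⟩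

lemma inB_shape {m m' : List (List Int)} (h : SameShape m m') (p : Int × Int) :
    InB m p ↔ InB m' p := by
  unfold InB; rw [h.1, h.2 p.1.toNat]

lemma getD_set_ne {α : Type} (l : List α) (d : α) {i j : Nat} (hij : i ≠ j) (x : α) :
    (l.set i x).getD j d = l.getD j d := by
  simp [List.getD, hij]

lemma getD_set_self {α : Type} (l : List α) (d : α) {i : Nat} (hi : i < l.length) (x : α) :
    (l.set i x).getD i d = x := by
  simp [List.getD, hi]

lemma gc_zero_of_out (m : List (List Int)) (r c : Int)
    (h : ¬(0 ≤ r ∧ r < (m.length : Int) ∧ 0 ≤ c ∧ c < ((m.getD r.toNat []).length : Int))) :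
    getCell m r c = 0 := by
  unfold getCell
  by_cases h1 : 0 ≤ r ∧ 0 ≤ c
  · rw [if_pos h1]
    by_cases h2 : r < (m.length : Int)
    · rw [List.getD_eq_default _ 0 (by omega)]
    · rw [List.getD_eq_default m [] (by omega)]
      simp
  · rw [if_neg h1]

lemma gc_ne_zero {m : List (List Int)} {r c : Int} (h : getCell m r c ≠ 0) : InB m (r, c) := by
  rw [inB_def]
  by_contra hb
  exact h (gc_zero_of_out m r c hb)

lemma gc_natCast (m : List (List Int)) (i j : Nat) :
    getCell m (i : Int) (j : Int) = (m.getD i []).getD j 0 := by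
  unfold getCell
  rw [if_pos ⟨Int.natCast_nonneg i, Int.natCast_nonneg j⟩, Int.toNat_natCast, Int.toNat_natCast]

-- setCell lemmas (all under in-bounds of the written cell)
lemma setCell_shape {m : List (List Int)} {r c : Int} (h : InB m (r, c)) (v : Int) :
    SameShape (setCell m r c v) m := by
  obtain ⟨h1, h2, h3, h4⟩ := inB_def.mp h
  unfold setCell SameShape
  refine ⟨List.length_set .., fun i => ?_⟩
  by_cases hi : i = r.toNat
  · subst hi
    rw [getD_set_self _ _ (by omega), List.length_set]
  · rw [getD_set_ne _ _ (fun hh => hi hh.symm)]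

lemma gc_setCell_self {m : List (List Int)} {r c : Int} (h : InB m (r, c)) (v : Int) :
    getCell (setCell m r c v) r c = v := by
  obtain ⟨h1, h2, h3, h4⟩ := inB_def.mp h
  unfold getCell setCell
  rw [if_pos ⟨h1, h3⟩]
  rw [getD_set_self _ _ (by omega)]
  rw [getD_set_self _ _ (by omega)]

lemma gc_setCell_ne {m : List (List Int)} {r c : Int} (h : InB m (r, c)) (v : Int)
    {r' c' : Int} (hne : (r', c') ≠ (r, c)) :
    getCell (setCell m r c v) r' c' = getCell m r' c' := by
  obtain ⟨h1, h2, h3, h4⟩ := inB_def.mp h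
  unfold getCell setCell
  by_cases hn : 0 ≤ r' ∧ 0 ≤ c'
  · rw [if_pos hn, if_pos hn]
    by_cases hr : r'.toNat = r.toNat
    · have hrr : r' = r := by omega
      have hcc : c' ≠ c := fun hh => hne (by rw [hrr, hh])
      have hc : c'.toNat ≠ c.toNat := by omega
      have hlt : r.toNat < m.length := by omega
      rw [hr]
      rw [getD_set_self _ _ hlt]
      rw [getD_set_ne _ _ (fun hh => hc hh.symm)]
    · rw [getD_set_ne _ _ (fun hh => hr hh.symm)]
  · rw [if_neg hn, if_neg hn]

-- generic counting helpers
lemma filterLen_set (f : Int → Bool) :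
    ∀ (xs : List Int) (j : Nat) (v : Int), j < xs.length →
      ((xs.set j v).filter f).length + (if f (xs.getD j 0) then 1 else 0) =
        (xs.filter f).length + (if f v then 1 else 0) := by
  intro xs
  induction xs with
  | nil => intro j v h; simp at h
  | cons x t ih =>
    intro j v h
    cases j with
    | zero =>
      simp only [List.set_cons_zero, List.filter_cons, List.getD_cons_zero]
      by_cases hfx : f x <;> by_cases hfv : f v <;> simp [hfx, hfv]
    | succ j =>
      have hj : j < t.length := by simpa using h
      have := ih j v hj
      simp only [List.set_cons_succ, List.filter_cons, List.getD_cons_succ]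
      by_cases hfx : f x <;> simp only [hfx, Bool.false_eq_true, if_true, if_false, List.length_cons] <;> omega

lemma sumMap_set (g : List Int → Nat) :
    ∀ (xs : List (List Int)) (i : Nat) (x : List Int), i < xs.length →
      ((xs.set i x).map g).sum + g (xs.getD i []) = (xs.map g).sum + g x := by
  intro xs
  induction xs with
  | nil => intro i x h; simp at h
  | cons y t ih =>
    intro i x h
    cases i with
    | zero => simp; omega
    | succ i =>
      simp only [List.set_cons_succ, List.map_cons, List.sum_cons, List.getD_cons_succ]
      have := ih i x (by simpa using h)
      omega

lemma negCount_setCell {m : List (List Int)} {r c : Int} (hin : InB m (r, c))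
    (hneg : getCell m r c < 0) {v : Int} (hv : 0 < v) :
    negCount (setCell m r c v) + 1 = negCount m := by
  obtain ⟨h1, h2, h3, h4⟩ := inB_def.mp hin
  unfold negCount setCell
  have hval : getCell m r c = (m.getD r.toNat []).getD c.toNat 0 := by
    unfold getCell; rw [if_pos ⟨h1, h3⟩]
  have hrow := filterLen_set (fun v => decide (v < 0)) (m.getD r.toNat []) c.toNat v (by omega)
  have hsum := sumMap_set (fun row => (row.filter (fun v => decide (v < 0))).length)
    m r.toNat ((m.getD r.toNat []).set c.toNat v) (by omega)
  rw [hval] at hneg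
  rw [if_pos (by simpa using hneg)] at hrow
  rw [if_neg (by simp; omega)] at hrow
  simp only at hsum
  omega

-- A's adjacent position list: shape-invariance, sublist-of-four, characterisation
lemma adj_shape_eq {m m' : List (List Int)} (h : SameShape m' m) (r c : Int) :
    adjacent_positions r c m' = adjacent_positions r c m := by
  unfold adjacent_positions
  rw [h.1]
  rw [show PySem.List.pyGetD m' 0 [] = m'.getD 0 [] from PySem.List.pyGetD_zero m' []]
  rw [show PySem.List.pyGetD m 0 [] = m.getD 0 [] from PySem.List.pyGetD_zero m []]
  rw [h.2 0]

lemma mem_if_append {α : Type} {xs : List α} {b : Prop} [Decidable b] {a x : α} :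
    x ∈ (if b then xs ++ [a] else xs) ↔ x ∈ xs ∨ (b ∧ x = a) := by
  split_ifs with hb <;> simp [List.mem_append, hb]

lemma sublist_if_append {α : Type} {xs ys : List α} {b : Prop} [Decidable b] (a : α)
    (h : List.Sublist xs ys) : List.Sublist (if b then xs ++ [a] else xs) (ys ++ [a]) := by
  split_ifs
  · simpa using h.append (List.Sublist.refl [a])
  · exact h.trans (List.sublist_append_left ys [a])

lemma adj_sublist (r c : Int) (m : List (List Int)) :
    List.Sublist (adjacent_positions r c m)
      [(r - 1, c), (r + 1, c), (r, c - 1), (r, c + 1)] := by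
  unfold adjacent_positions
  rw [show ([(r - 1, c), (r + 1, c), (r, c - 1), (r, c + 1)] : List (Int × Int)) =
    (([(r - 1, c)] ++ [(r + 1, c)]) ++ [(r, c - 1)]) ++ [(r, c + 1)] from rfl]
  apply sublist_if_append
  apply sublist_if_append
  apply sublist_if_append
  split_ifs <;> simp

lemma adj_pairwise (r c : Int) (m : List (List Int)) :
    (adjacent_positions r c m).Pairwise (· ≠ ·) := by
  refine List.Pairwise.sublist (adj_sublist r c m) ?_
  simp only [List.pairwise_cons, List.mem_cons, List.not_mem_nil, or_false, ne_eq]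
  refine ⟨?_, ?_, ?_, ?_⟩ <;> simp_all [Prod.ext_iff] <;> omega

-- membership in adjacent_positions, before using any rectangularity
lemma adj_mem_iff (r c : Int) (m : List (List Int)) (p : Int × Int) :
    p ∈ adjacent_positions r c m ↔
      (0 < r ∧ p = (r - 1, c)) ∨ (r < (m.length : Int) - 1 ∧ p = (r + 1, c)) ∨
      (0 < c ∧ p = (r, c - 1)) ∨ (c < ((m.getD 0 []).length : Int) - 1 ∧ p = (r, c + 1)) := by
  unfold adjacent_positions
  rw [show PySem.List.pyGetD m 0 [] = m.getD 0 [] from PySem.List.pyGetD_zero m []]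
  rw [mem_if_append, mem_if_append, mem_if_append]
  split_ifs with hb <;> simp [hb] <;> tauto

-- row lengths under rectangularity
lemma rect_row_len {m : List (List Int)} (h : Pre_convert_negatives m) {i : Nat}
    (hi : i < m.length) : (m.getD i []).length = (m.getD 0 []).length := by
  unfold Pre_convert_negatives at h
  have h0 : m.getD 0 [] = m.headD [] := by cases m <;> rfl
  rw [h0, List.getD_eq_getElem m [] hi]
  exact h _ (List.getElem_mem hi)

-- the characterisation of A's adjacency on rectangular matrices
lemma adj_char {m : List (List Int)} (hRect : Pre_convert_negatives m) {s : Int × Int}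
    (hs : InB m s) (p : Int × Int) :
    p ∈ adjacent_positions s.1 s.2 m ↔ AdjP p s ∧ InB m p := by
  obtain ⟨hs1, hs2, hs3, hs4⟩ := hs
  have hW : ∀ i : Nat, i < m.length → (m.getD i []).length = (m.getD 0 []).length :=
    fun i hi => rect_row_len hRect hi
  have hsW := hW s.1.toNat (by omega)
  rw [adj_mem_iff]
  constructor
  · rintro (⟨hg, rfl⟩ | ⟨hg, rfl⟩ | ⟨hg, rfl⟩ | ⟨hg, rfl⟩)
    · refine ⟨Or.inl ⟨rfl, rfl⟩, ?_, ?_, ?_, ?_⟩ <;>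
        simp only [] <;> first | omega | (rw [hW _ (by omega)]; omega)
    · refine ⟨Or.inr (Or.inl ⟨rfl, rfl⟩), ?_, ?_, ?_, ?_⟩ <;>
        simp only [] <;> first | omega | (rw [hW _ (by omega)]; omega)
    · refine ⟨Or.inr (Or.inr (Or.inl ⟨rfl, rfl⟩)), ?_, ?_, ?_, ?_⟩ <;>
        simp only [] <;> first | omega | (rw [hW _ (by omega)]; omega)
    · refine ⟨Or.inr (Or.inr (Or.inr ⟨rfl, rfl⟩)), ?_, ?_, ?_, ?_⟩ <;>
        simp only [] <;> first | omega | (rw [hW _ (by omega)]; omega)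
  · rintro ⟨hadj, hp1, hp2, hp3, hp4⟩
    have hpW := hW p.1.toNat (by omega)
    rcases hadj with ⟨e1, e2⟩ | ⟨e1, e2⟩ | ⟨e1, e2⟩ | ⟨e1, e2⟩
    · exact Or.inl ⟨by omega, Prod.ext e1 e2⟩
    · exact Or.inr (Or.inl ⟨by omega, Prod.ext e1 e2⟩)
    · exact Or.inr (Or.inr (Or.inl ⟨by omega, Prod.ext e1 e2⟩))
    · refine Or.inr (Or.inr (Or.inr ⟨?_, Prod.ext e1 e2⟩))
      rw [← hW s.1.toNat (by omega)]
      have : s.1.toNat = p.1.toNat := by omega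
      rw [this]; omega

-- generic equation lemma for the append-if folds of both ports
lemma foldl_append_if_eq {α : Type} (P : Int → Prop) [DecidablePred P] (f : Int → α) :
    ∀ (l : List Int) (acc : List α),
      l.foldl (fun acc a => if P a then acc ++ [f a] else acc) acc =
        acc ++ (l.filter (fun a => decide (P a))).map f := by
  intro l
  induction l with
  | nil => simp
  | cons x xs ih =>
    intro acc
    by_cases hx : P x <;> simp [hx, ih]

-- membership in the shared nested range/append-if fold of both ports
lemma mem_nested_fold (P : Int → Int → Prop) [inst : ∀ r c, Decidable (P r c)]
    (m : List (List Int)) (p : Int × Int) :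
    p ∈ (PySem.List.pyRange 0 (m.length : Int) 1).foldl (fun acc r =>
        (PySem.List.pyRange 0 ((PySem.List.pyGetD m r []).length : Int) 1).foldl (fun acc2 c =>
          if P r c then acc2 ++ [(r, c)] else acc2) acc) [] ↔
      InB m p ∧ P p.1 p.2 := by
  have hinner : ∀ (r : Int) (acc : List (Int × Int)),
      (PySem.List.pyRange 0 ((PySem.List.pyGetD m r []).length : Int) 1).foldl (fun acc2 c =>
          if P r c then acc2 ++ [(r, c)] else acc2) acc =
        acc ++ ((PySem.List.pyRange 0 ((PySem.List.pyGetD m r []).length : Int) 1).filter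
          (fun c => decide (P r c))).map (fun c => (r, c)) :=
    fun r acc => foldl_append_if_eq (P r) (fun c => (r, c)) _ acc
  rw [show (fun (acc : List (Int × Int)) (r : Int) =>
      (PySem.List.pyRange 0 ((PySem.List.pyGetD m r []).length : Int) 1).foldl (fun acc2 c =>
        if P r c then acc2 ++ [(r, c)] else acc2) acc) = fun acc r =>
      acc ++ ((PySem.List.pyRange 0 ((PySem.List.pyGetD m r []).length : Int) 1).filter
          (fun c => decide (P r c))).map (fun c => (r, c)) from funext₂ (fun acc r => hinner r acc)]
  rw [PySem.List.foldl_append_eq_flatMap]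
  simp only [List.nil_append, List.mem_flatMap, List.mem_map, List.mem_filter,
    PySem.List.mem_pyRange_one, decide_eq_true_eq]
  constructor
  · rintro ⟨r, ⟨hr0, hrl⟩, c, ⟨⟨hc0, hcl⟩, hP⟩, rfl⟩
    rw [PySem.List.pyGetD_of_nonneg m [] hr0] at hcl
    exact ⟨⟨hr0, hrl, hc0, hcl⟩, hP⟩
  · rintro ⟨⟨h1, h2, h3, h4⟩, hP⟩
    refine ⟨p.1, ⟨h1, h2⟩, p.2, ⟨⟨h3, ?_⟩, hP⟩, rfl⟩
    rw [PySem.List.pyGetD_of_nonneg m [] h1]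
    exact h4

-- characterisation of indices_of_positive_values
lemma mem_indices_iff (m : List (List Int)) (p : Int × Int) :
    p ∈ indices_of_positive_values m ↔ InB m p ∧ getCell m p.1 p.2 > 0 := by
  unfold indices_of_positive_values
  exact mem_nested_fold (fun r c => getCell m r c > 0) m p

-- characterisation of hasPosNeighbor
lemma hasPosNeighbor_iff (m : List (List Int)) (r c : Int) :
    hasPosNeighbor m r c = true ↔ ∃ s, AdjP s (r, c) ∧ getCell m s.1 s.2 > 0 := by
  unfold hasPosNeighbor
  simp only [List.any_eq_true, List.mem_cons, List.not_mem_nil, or_false,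
    Bool.and_eq_true, decide_eq_true_eq]
  constructor
  · rintro ⟨s, hmem, hconds⟩
    refine ⟨s, ?_, hconds.2⟩
    unfold AdjP
    rcases hmem with rfl | rfl | rfl | rfl
    · exact Or.inl ⟨rfl, rfl⟩
    · exact Or.inr (Or.inl ⟨rfl, rfl⟩)
    · exact Or.inr (Or.inr (Or.inl ⟨rfl, rfl⟩))
    · exact Or.inr (Or.inr (Or.inr ⟨rfl, rfl⟩))
  · rintro ⟨s, hadj, hpos⟩
    have hin := gc_ne_zero (show getCell m s.1 s.2 ≠ 0 by omega)
    obtain ⟨h1, h2, h3, h4⟩ := inB_def.mp hin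
    refine ⟨s, ?_, ⟨⟨⟨h1, h2⟩, h3⟩, ?_⟩, hpos⟩
    · unfold AdjP at hadj
      rcases hadj with ⟨e1, e2⟩ | ⟨e1, e2⟩ | ⟨e1, e2⟩ | ⟨e1, e2⟩
      · exact Or.inl (Prod.ext e1 e2)
      · exact Or.inr (Or.inl (Prod.ext e1 e2))
      · exact Or.inr (Or.inr (Or.inl (Prod.ext e1 e2)))
      · exact Or.inr (Or.inr (Or.inr (Prod.ext e1 e2)))
    · rw [PySem.List.pyGetD_of_nonneg m [] h1]
      exact h4

-- characterisation of collectFlips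
lemma mem_collectFlips_iff (m : List (List Int)) (p : Int × Int) :
    p ∈ collectFlips m ↔
      InB m p ∧ getCell m p.1 p.2 < 0 ∧ hasPosNeighbor m p.1 p.2 = true := by
  unfold collectFlips
  exact mem_nested_fold (fun r c => getCell m r c < 0 ∧ hasPosNeighbor m r c = true) m p

-- the fold over one popped cell's adjacent positions
-- (flipStep is literally the lambda inside processOne)
def flipStep (st : List (List Int) × List (Int × Int)) (pos : Int × Int) :
    List (List Int) × List (Int × Int) :=
  let v := getCell st.1 pos.1 pos.2
  if v < 0 then (setCell st.1 pos.1 pos.2 (v * -1), st.2 ++ [pos]) else st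

lemma foldPositions :
    ∀ (ps : List (Int × Int)), ps.Pairwise (· ≠ ·) →
    ∀ (m : List (List Int)) (acc : List (Int × Int)),
      (ps.foldl flipStep (m, acc)).2 =
          acc ++ ps.filter (fun p => decide (getCell m p.1 p.2 < 0)) ∧
      SameShape (ps.foldl flipStep (m, acc)).1 m ∧
      (∀ r c, getCell (ps.foldl flipStep (m, acc)).1 r c =
          if (r, c) ∈ ps ∧ getCell m r c < 0 then -(getCell m r c) else getCell m r c) ∧
      negCount (ps.foldl flipStep (m, acc)).1 +
        (ps.filter (fun p => decide (getCell m p.1 p.2 < 0))).length = negCount m := by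
  intro ps
  induction ps with
  | nil =>
    intro _ m acc
    refine ⟨by simp, ⟨rfl, fun _ => rfl⟩, fun r c => ?_, by simp⟩
    rw [if_neg (by simp)]
    rfl
  | cons p t ih =>
    intro hps m acc
    obtain ⟨hnp, ht⟩ := List.pairwise_cons.mp hps
    rw [List.foldl_cons]
    by_cases hv : getCell m p.1 p.2 < 0
    · have hstep : flipStep (m, acc) p =
          (setCell m p.1 p.2 (getCell m p.1 p.2 * -1), acc ++ [p]) := by
        unfold flipStep
        exact if_pos hv
      rw [hstep]
      have hin : InB m (p.1, p.2) := gc_ne_zero (by omega)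
      set m1 := setCell m p.1 p.2 (getCell m p.1 p.2 * -1) with hm1
      have hshape1 : SameShape m1 m := setCell_shape hin _
      have hcnt1 : negCount m1 + 1 = negCount m := negCount_setCell hin hv (by omega)
      have hgc_self : getCell m1 p.1 p.2 = getCell m p.1 p.2 * -1 := gc_setCell_self hin _
      have hgc_ne : ∀ x : Int × Int, x ≠ p → getCell m1 x.1 x.2 = getCell m x.1 x.2 := by
        intro x hx
        exact gc_setCell_ne hin _ (fun hh => hx (by
          have : (x.1, x.2) = (p.1, p.2) := hh
          calc x = (x.1, x.2) := rfl
          _ = (p.1, p.2) := this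
          _ = p := rfl))
      have hfilter : t.filter (fun x => decide (getCell m1 x.1 x.2 < 0)) =
          t.filter (fun x => decide (getCell m x.1 x.2 < 0)) := by
        apply List.filter_congr
        intro x hx
        rw [hgc_ne x (fun hh => hnp x hx hh.symm)]
      obtain ⟨ih1, ih2, ih3, ih4⟩ := ih ht m1 (acc ++ [p])
      refine ⟨?_, sameShape_trans ih2 hshape1, ?_, ?_⟩
      · rw [ih1, hfilter, List.filter_cons_of_pos (by simpa using hv)]
        simp
      · intro r c
        by_cases hpc : (r, c) = p
        · have hrc1 : r = p.1 := congrArg Prod.fst hpc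
          have hrc2 : c = p.2 := congrArg Prod.snd hpc
          rw [hrc1, hrc2]
          have hnt : (p.1, p.2) ∉ t := fun hmem => hnp _ hmem rfl
          rw [ih3 p.1 p.2, if_neg (fun hcond => hnt hcond.1), hgc_self]
          rw [if_pos ⟨List.mem_cons_self .., hv⟩]
          omega
        · have hne := hgc_ne (r, c) hpc
          rw [ih3 r c]
          simp only [hne]
          by_cases hmem : (r, c) ∈ t
          · have : (r, c) ∈ p :: t := List.mem_cons_of_mem p hmem
            by_cases hneg : getCell m r c < 0
            · rw [if_pos ⟨hmem, hneg⟩, if_pos ⟨this, hneg⟩]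
            · rw [if_neg (fun hc => hneg hc.2), if_neg (fun hc => hneg hc.2)]
          · have hnotc : (r, c) ∉ p :: t := by
              intro hc
              rcases List.mem_cons.mp hc with hc1 | hc2
              · exact hpc hc1
              · exact hmem hc2
            rw [if_neg (fun hc => hmem hc.1), if_neg (fun hc => hnotc hc.1)]
      · rw [hfilter] at ih4
        rw [List.filter_cons_of_pos (by simpa using hv)]
        simp only [List.length_cons]
        omega
    · have hstep : flipStep (m, acc) p = (m, acc) := by
        unfold flipStep
        exact if_neg hv
      rw [hstep]
      obtain ⟨ih1, ih2, ih3, ih4⟩ := ih ht m acc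
      refine ⟨?_, ih2, ?_, ?_⟩
      · rw [ih1, List.filter_cons_of_neg (by simpa using hv)]
      · intro r c
        rw [ih3 r c]
        by_cases hpc : (r, c) = p
        · have hrc1 : r = p.1 := congrArg Prod.fst hpc
          have hrc2 : c = p.2 := congrArg Prod.snd hpc
          rw [hrc1, hrc2]
          rw [if_neg (fun hc => hv hc.2), if_neg (fun hc => hv hc.2)]
        · by_cases hmem : (r, c) ∈ t
          · have : (r, c) ∈ p :: t := List.mem_cons_of_mem p hmem
            by_cases hneg : getCell m r c < 0
            · rw [if_pos ⟨hmem, hneg⟩, if_pos ⟨this, hneg⟩]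
            · rw [if_neg (fun hc => hneg hc.2), if_neg (fun hc => hneg hc.2)]
          · have hnotc : (r, c) ∉ p :: t := by
              intro hc
              rcases List.mem_cons.mp hc with hc1 | hc2
              · exact hpc hc1
              · exact hmem hc2
            rw [if_neg (fun hc => hmem hc.1), if_neg (fun hc => hnotc hc.1)]
      · rw [List.filter_cons_of_neg (by simpa using hv), ih4]

-- one whole BFS level of A
lemma processLevel_spec :
    ∀ (q : List (Int × Int)) (m : List (List Int)) (ext : List (Int × Int)),
      ∃ M fl, processLevel q.length m (q ++ ext) = (M, ext ++ fl) ∧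
        SameShape M m ∧
        (∀ r c, FlipSet m q (r, c) → getCell M r c = -(getCell m r c)) ∧
        (∀ r c, ¬ FlipSet m q (r, c) → getCell M r c = getCell m r c) ∧
        (∀ p, p ∈ fl ↔ FlipSet m q p) ∧
        negCount M + fl.length = negCount m := by
  intro q
  induction q with
  | nil =>
    intro m ext
    refine ⟨m, [], by simp [processLevel], ⟨rfl, fun _ => rfl⟩, ?_, fun _ _ _ => rfl, ?_, by simp⟩
    · rintro r c ⟨-, s, hs, -⟩
      exact absurd hs (List.not_mem_nil)
    · rintro p
      simp only [List.not_mem_nil, false_iff]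
      rintro ⟨-, s, hs, -⟩
      exact absurd hs (List.not_mem_nil)
  | cons s rest ih =>
    intro m ext
    obtain ⟨row, col⟩ := s
    set ps := adjacent_positions row col m with hps
    have hone : processOne m ((row, col) :: (rest ++ ext)) =
        ps.foldl flipStep (m, rest ++ ext) := rfl
    obtain ⟨f1, f2, f3, f4⟩ := foldPositions ps (adj_pairwise row col m) m (rest ++ ext)
    set st := ps.foldl flipStep (m, rest ++ ext) with hst
    set m1 := st.1 with hm1
    set new1 := ps.filter (fun p => decide (getCell m p.1 p.2 < 0)) with hnew1
    -- one unfolding of processLevel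
    have hunfold : processLevel ((row, col) :: rest).length m (((row, col) :: rest) ++ ext) =
        processLevel rest.length m1 (rest ++ (ext ++ new1)) := by
      have h2 : st.2 = rest ++ (ext ++ new1) := by rw [f1, List.append_assoc]
      calc processLevel (rest.length + 1) m (((row, col) :: rest) ++ ext)
          = processLevel rest.length (processOne m (((row, col) :: rest) ++ ext)).1
              (processOne m (((row, col) :: rest) ++ ext)).2 := rfl
        _ = processLevel rest.length st.1 st.2 := by rw [List.cons_append, hone]
        _ = _ := by rw [← hm1, h2]
    obtain ⟨M, flR, heq, hshape, hpt1, hpt2, hmem, hcnt⟩ := ih m1 (ext ++ new1)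
    -- translate facts about m1 back to m
    have hadj1 : ∀ s' : Int × Int, adjacent_positions s'.1 s'.2 m1 = adjacent_positions s'.1 s'.2 m :=
      fun s' => adj_shape_eq f2 s'.1 s'.2
    have hN1 : ∀ p : Int × Int, p ∈ new1 ↔ (p ∈ ps ∧ getCell m p.1 p.2 < 0) := by
      intro p
      rw [hnew1, List.mem_filter, decide_eq_true_eq]
    have hgc1_neg : ∀ p : Int × Int, getCell m1 p.1 p.2 < 0 ↔
        (getCell m p.1 p.2 < 0 ∧ (p.1, p.2) ∉ ps) := by
      intro p
      rw [hm1, f3 p.1 p.2]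
      by_cases hc : (p.1, p.2) ∈ ps ∧ getCell m p.1 p.2 < 0
      · rw [if_pos hc]
        constructor
        · intro hlt; omega
        · rintro ⟨-, hnot⟩; exact absurd hc.1 hnot
      · rw [if_neg hc]
        constructor
        · intro hlt
          refine ⟨hlt, fun hmem => hc ⟨hmem, hlt⟩⟩
        · rintro ⟨hlt, -⟩; exact hlt
    have hFS1 : ∀ p : Int × Int, FlipSet m1 rest p ↔
        (getCell m p.1 p.2 < 0 ∧ (p.1, p.2) ∉ ps ∧
          ∃ s' ∈ rest, p ∈ adjacent_positions s'.1 s'.2 m) := by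
      intro p
      unfold FlipSet
      rw [hgc1_neg p]
      constructor
      · rintro ⟨⟨h1, h2⟩, s', hs', hp⟩
        exact ⟨h1, h2, s', hs', by rwa [hadj1 s'] at hp⟩
      · rintro ⟨h1, h2, s', hs', hp⟩
        exact ⟨⟨h1, h2⟩, s', hs', by rwa [hadj1 s']⟩
    have hFScons : ∀ p : Int × Int, FlipSet m ((row, col) :: rest) p ↔
        ((p.1, p.2) ∈ ps ∧ getCell m p.1 p.2 < 0) ∨ FlipSet m1 rest p := by
      intro p
      rw [hFS1 p]
      unfold FlipSet
      constructor
      · rintro ⟨hneg, s', hs', hp⟩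
        rcases List.mem_cons.mp hs' with rfl | hs''
        · exact Or.inl ⟨hp, hneg⟩
        · by_cases hmem : (p.1, p.2) ∈ ps
          · exact Or.inl ⟨hmem, hneg⟩
          · exact Or.inr ⟨hneg, hmem, s', hs'', hp⟩
      · rintro (⟨hmem, hneg⟩ | ⟨hneg, -, s', hs', hp⟩)
        · exact ⟨hneg, (row, col), List.mem_cons_self .., hmem⟩
        · exact ⟨hneg, s', List.mem_cons_of_mem _ hs', hp⟩
    -- the value of getCell m1 where nothing was flipped
    have hgc1_eq : ∀ p : Int × Int, ¬((p.1, p.2) ∈ ps ∧ getCell m p.1 p.2 < 0) →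
        getCell m1 p.1 p.2 = getCell m p.1 p.2 := by
      intro p hp
      rw [hm1, f3 p.1 p.2, if_neg hp]
    refine ⟨M, new1 ++ flR, ?_, sameShape_trans hshape f2, ?_, ?_, ?_, ?_⟩
    · rw [hunfold, heq, List.append_assoc]
    · intro r c hflip
      rcases (hFScons (r, c)).mp hflip with hcase | hcase
      · have hnot1 : ¬ FlipSet m1 rest (r, c) := by
          rw [hFS1]
          rintro ⟨-, habs, -⟩
          exact habs hcase.1
        rw [hpt2 r c hnot1, hm1, f3 r c, if_pos hcase]
      · have hm1eq : getCell m1 r c = getCell m r c := by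
          apply hgc1_eq (r, c)
          rintro ⟨hmem, -⟩
          exact ((hFS1 (r, c)).mp hcase).2.1 hmem
        rw [hpt1 r c hcase, hm1eq]
    · intro r c hflip
      rw [hFScons] at hflip
      have h1 : ¬(((r, c) : Int × Int) ∈ ps ∧ getCell m r c < 0) := fun hc => hflip (Or.inl hc)
      have h2 : ¬ FlipSet m1 rest (r, c) := fun hc => hflip (Or.inr hc)
      rw [hpt2 r c h2]
      exact hgc1_eq (r, c) h1
    · intro p
      rw [List.mem_append, hmem p, hN1 p, hFS1 p, hFScons p, hFS1 p]
    · have hlen : (new1 ++ flR).length = new1.length + flR.length := List.length_append ..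
      rw [hlen]
      omega

-- pointwise description of B's rebuild
lemma getD_zero_eq_headD (x : List (List Int)) : x.getD 0 [] = x.headD [] := by
  cases x <;> rfl

lemma applyFlips_getD (m : List (List Int)) (fl : List (Int × Int)) {i : Nat}
    (hi : i < m.length) :
    (applyFlips m fl).getD i [] =
      (PySem.List.enumerate (m.getD i []) 0).map
        (fun cv => if ((i : Int), cv.1) ∈ fl then -cv.2 else cv.2) := by
  unfold applyFlips
  have hlen : i < ((PySem.List.enumerate m 0).map (fun rrow =>
      (PySem.List.enumerate rrow.2 0).map
        (fun cv => if (rrow.1, cv.1) ∈ fl then -cv.2 else cv.2))).length := by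
    simpa [PySem.List.length_enumerate] using hi
  rw [List.getD_eq_getElem _ _ hlen, List.getElem_map, PySem.List.getElem_enumerate]
  simp only [Int.zero_add]
  rw [List.getD_eq_getElem m [] hi]

lemma applyFlips_shape (m : List (List Int)) (fl : List (Int × Int)) :
    SameShape (applyFlips m fl) m := by
  have hlen : (applyFlips m fl).length = m.length := by
    unfold applyFlips
    simp [PySem.List.length_enumerate]
  refine ⟨hlen, fun i => ?_⟩
  by_cases hi : i < m.length
  · rw [applyFlips_getD m fl hi]
    simp [PySem.List.length_enumerate]
  · rw [List.getD_eq_default _ _ (by omega), List.getD_eq_default _ _ (by omega)]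

lemma gc_applyFlips (m : List (List Int)) (fl : List (Int × Int)) {r c : Int}
    (h : InB m (r, c)) :
    getCell (applyFlips m fl) r c =
      if (r, c) ∈ fl then -(getCell m r c) else getCell m r c := by
  obtain ⟨h1, h2, h3, h4⟩ := inB_def.mp h
  have hgc : getCell m r c = (m.getD r.toNat []).getD c.toNat 0 := by
    unfold getCell; rw [if_pos ⟨h1, h3⟩]
  have hclen : c.toNat < (m.getD r.toNat []).length := by omega
  have hrl : ((r.toNat : Nat) : Int) = r := Int.toNat_of_nonneg h1
  have hcl : ((c.toNat : Nat) : Int) = c := Int.toNat_of_nonneg h3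
  have hout : getCell (applyFlips m fl) r c =
      ((applyFlips m fl).getD r.toNat []).getD c.toNat 0 := by
    unfold getCell; rw [if_pos ⟨h1, h3⟩]
  rw [hout]
  rw [applyFlips_getD m fl (by omega)]
  have hmlen : c.toNat < ((PySem.List.enumerate (m.getD r.toNat []) 0).map
      (fun cv => if ((r.toNat : Int), cv.1) ∈ fl then -cv.2 else cv.2)).length := by
    simpa [PySem.List.length_enumerate] using hclen
  rw [List.getD_eq_getElem _ _ hmlen, List.getElem_map, PySem.List.getElem_enumerate]
  simp only [Int.zero_add, hrl, hcl]
  rw [hgc, List.getD_eq_getElem _ _ hclen]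

-- extensionality: same shape + same cells ⇒ equal matrices
lemma matrix_ext {m m' : List (List Int)} (hs : SameShape m' m)
    (h : ∀ r c : Int, InB m (r, c) → getCell m' r c = getCell m r c) : m' = m := by
  apply List.ext_getElem hs.1
  intro i h1 h2
  have hrowlen : (m'[i]'h1).length = (m[i]'h2).length := by
    rw [← List.getD_eq_getElem m' [] h1, ← List.getD_eq_getElem m [] h2]
    exact hs.2 i
  apply List.ext_getElem hrowlen
  intro j hj1 hj2
  have hin : InB m ((i : Int), (j : Int)) := by
    rw [inB_def]
    refine ⟨Int.natCast_nonneg i, by exact_mod_cast h2, Int.natCast_nonneg j, ?_⟩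
    rw [Int.toNat_natCast, List.getD_eq_getElem m [] h2]
    exact_mod_cast hj2
  have := h (i : Int) (j : Int) hin
  rw [gc_natCast, gc_natCast] at this
  rw [List.getD_eq_getElem m' [] h1, List.getD_eq_getElem m [] h2] at this
  rw [List.getD_eq_getElem _ _ hj1, List.getD_eq_getElem _ _ hj2] at this
  exact this

lemma outer_nil (f : Nat) (m : List (List Int)) (p : Int) : outerLoop f m [] p = p := by
  cases f <;> simp [outerLoop]

lemma rect_shape {m m' : List (List Int)} (hs : SameShape m' m)
    (h : Pre_convert_negatives m) : Pre_convert_negatives m' := by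
  intro row hrow
  have hlen := hs.1
  obtain ⟨i, hi, rfl⟩ := List.mem_iff_getElem.mp hrow
  rw [← List.getD_eq_getElem m' [] hi, ← getD_zero_eq_headD]
  rw [hs.2 i, hs.2 0]
  exact (rect_row_len h (by omega)).trans (by rw [getD_zero_eq_headD])


-- the bridge: under the invariants, B's round collects exactly A's next BFS level
lemma sameShape_symm {a b : List (List Int)} (h : SameShape a b) : SameShape b a :=
  ⟨h.1.symm, fun i => (h.2 i).symm⟩

lemma collect_eq_flipSet {m : List (List Int)} {q : List (Int × Int)}
    (hRect : Pre_convert_negatives m) (hQ : QInv m q) (hK : KeyInv m q) (p : Int × Int) :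
    p ∈ collectFlips m ↔ FlipSet m q p := by
  rw [mem_collectFlips_iff]
  constructor
  · rintro ⟨hin, hneg, hpos⟩
    obtain ⟨s, hadj, hspos⟩ := (hasPosNeighbor_iff m p.1 p.2).mp hpos
    have hsq : s ∈ q := hK p hneg s hadj hspos
    have hsin : InB m s := gc_ne_zero (by omega)
    refine ⟨hneg, s, hsq, ?_⟩
    rw [adj_char hRect hsin p]
    exact ⟨adjP_symm hadj, hin⟩
  · rintro ⟨hneg, s, hsq, hadj⟩
    have hspos := hQ s hsq
    have hsin : InB m s := gc_ne_zero (by omega)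
    rw [adj_char hRect hsin p] at hadj
    refine ⟨hadj.2, hneg, ?_⟩
    rw [hasPosNeighbor_iff]
    exact ⟨s, adjP_symm hadj.1, hspos⟩

-- the main simulation: A's queue loop and B's round loop return the same pass count
lemma outer_eq : ∀ (fa fb : Nat) (m : List (List Int)) (q : List (Int × Int)) (p : Int),
    Pre_convert_negatives m → QInv m q → KeyInv m q → q ≠ [] →
    negCount m < fa → negCount m < fb →
    outerLoop fa m q p = altLoop fb m p := by
  intro fa
  induction fa with
  | zero => intro fb m q p _ _ _ _ hfa _; omega
  | succ fa ih =>
    intro fb m q p hRect hQ hK hne hfa hfb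
    obtain ⟨M, fl, heq, hshape, hpt1, hpt2, hmem, hcnt⟩ := processLevel_spec q m []
    simp only [List.append_nil, List.nil_append] at heq
    have hstepA : outerLoop (fa + 1) m q p = outerLoop fa M fl (p + 1) := by
      have hdef : outerLoop (fa + 1) m q p =
          if q.length > 0 then
            outerLoop fa (processLevel q.length m q).1 (processLevel q.length m q).2 (p + 1)
          else p := rfl
      rw [hdef, if_pos (by simpa using List.length_pos_of_ne_nil hne), heq]
    rw [hstepA]
    cases fb with
    | zero => omega
    | succ fb =>
      have hbridge := collect_eq_flipSet hRect hQ hK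
      have hstepB : altLoop (fb + 1) m p =
          if collectFlips m = [] then p + 1
          else altLoop fb (applyFlips m (PySem.Set.ofList (collectFlips m))) (p + 1) := rfl
      rw [hstepB]
      by_cases hflE : collectFlips m = []
      · have hfl : fl = [] := by
          rw [List.eq_nil_iff_forall_not_mem]
          intro x hx
          have hxc := (hbridge x).mpr ((hmem x).mp hx)
          rw [hflE] at hxc
          exact absurd hxc (List.not_mem_nil)
        rw [if_pos hflE, hfl, outer_nil]
      · rw [if_neg hflE]
        obtain ⟨x, hx⟩ := List.exists_mem_of_ne_nil _ hflE
        have hxfl : x ∈ fl := (hmem x).mpr ((hbridge x).mp hx)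
        have hflne : fl ≠ [] := fun habs => absurd (habs ▸ hxfl) (List.not_mem_nil)
        -- the two next states are the same matrix
        have hMeq : M = applyFlips m (PySem.Set.ofList (collectFlips m)) := by
          apply matrix_ext (sameShape_trans hshape (sameShape_symm (applyFlips_shape m _)))
          intro r c hin
          have hinm : InB m (r, c) :=
            (inB_shape (applyFlips_shape m (PySem.Set.ofList (collectFlips m))) (r, c)).mp hin
          rw [gc_applyFlips m (PySem.Set.ofList (collectFlips m)) hinm]
          by_cases hF : FlipSet m q (r, c)
          · rw [hpt1 r c hF,
              if_pos ((PySem.Set.mem_ofList _ _).mpr ((hbridge (r, c)).mpr hF))]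
          · rw [hpt2 r c hF,
              if_neg (fun hc => hF ((hbridge (r, c)).mp ((PySem.Set.mem_ofList _ _).mp hc)))]
        -- invariants for the next round
        have hRect' : Pre_convert_negatives M := rect_shape hshape hRect
        have hQ' : QInv M fl := by
          intro s hs
          have hFs := (hmem s).mp hs
          have hneg : getCell m s.1 s.2 < 0 := hFs.1
          have hM := hpt1 s.1 s.2 hFs
          omega
        have hK' : KeyInv M fl := by
          intro pp hppneg ss hadj hsspos
          by_cases hFp : FlipSet m q (pp.1, pp.2)
          · have hM := hpt1 pp.1 pp.2 hFp
            have hmneg : getCell m pp.1 pp.2 < 0 := hFp.1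
            omega
          · have hppm : getCell M pp.1 pp.2 = getCell m pp.1 pp.2 := hpt2 pp.1 pp.2 hFp
            by_cases hFs : FlipSet m q (ss.1, ss.2)
            · exact (hmem ss).mpr hFs
            · have hssm : getCell M ss.1 ss.2 = getCell m ss.1 ss.2 := hpt2 ss.1 ss.2 hFs
              have hssq : ss ∈ q := hK pp (by omega) ss hadj (by omega)
              exfalso
              apply hFp
              refine ⟨show getCell m pp.1 pp.2 < 0 by omega, ss, hssq, ?_⟩
              rw [adj_char hRect (gc_ne_zero (show getCell m ss.1 ss.2 ≠ 0 by omega)) _]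
              exact ⟨adjP_symm hadj, gc_ne_zero (show getCell m pp.1 pp.2 ≠ 0 by omega)⟩
        have hlenfl : 1 ≤ fl.length := List.length_pos_of_ne_nil hflne
        rw [← hMeq]
        exact ih fb M fl (p + 1) hRect' hQ' hK' hflne (by omega) (by omega)

-- the initial queue is nonempty exactly when some cell is positive
lemma any_iff (matrix : List (List Int)) :
    (matrix.any (fun row => row.any (fun v => v > 0)) = true) ↔
      ∃ p : Int × Int, InB matrix p ∧ getCell matrix p.1 p.2 > 0 := by
  simp only [List.any_eq_true, decide_eq_true_eq]
  constructor
  · rintro ⟨row, hrow, v, hv, hpos⟩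
    obtain ⟨i, hi, rfl⟩ := List.mem_iff_getElem.mp hrow
    obtain ⟨j, hj, rfl⟩ := List.mem_iff_getElem.mp hv
    refine ⟨((i : Int), (j : Int)), ?_, ?_⟩
    · rw [inB_def]
      refine ⟨Int.natCast_nonneg i, by exact_mod_cast hi, Int.natCast_nonneg j, ?_⟩
      rw [Int.toNat_natCast, List.getD_eq_getElem matrix [] hi]
      exact_mod_cast hj
    · rw [gc_natCast, List.getD_eq_getElem matrix [] hi, List.getD_eq_getElem _ _ hj]
      exact hpos
  · rintro ⟨p, hin, hpos⟩
    obtain ⟨h1, h2, h3, h4⟩ := inB_def.mp hin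
    have hi : p.1.toNat < matrix.length := by omega
    have hj : p.2.toNat < (matrix.getD p.1.toNat []).length := by omega
    have hgc : getCell matrix p.1 p.2 = (matrix.getD p.1.toNat []).getD p.2.toNat 0 := by
      unfold getCell; rw [if_pos ⟨h1, h3⟩]
    refine ⟨matrix.getD p.1.toNat [],
      by rw [List.getD_eq_getElem matrix [] hi]; exact List.getElem_mem hi,
      (matrix.getD p.1.toNat []).getD p.2.toNat 0, ?_, by omega⟩
    rw [List.getD_eq_getElem _ 0 hj]
    exact List.getElem_mem hj

-- ===== VERDICT (by name: the statement is the Claim_ definition above) =====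
theorem convert_negatives_spec : Claim_equal_convert_negatives := by
  intro matrix _ hPre
  unfold Spec_convert_negatives convert_negatives convert_negatives_alt
  by_cases hpos : matrix.any (fun row => row.any (fun v => v > 0)) = true
  · rw [if_pos hpos]
    obtain ⟨p, hin, hp⟩ := (any_iff matrix).mp hpos
    have hq : p ∈ indices_of_positive_values matrix := (mem_indices_iff matrix p).mpr ⟨hin, hp⟩
    have hqne : indices_of_positive_values matrix ≠ [] :=
      fun habs => absurd (habs ▸ hq) (List.not_mem_nil)
    apply outer_eq
    · exact hPre
    · intro s hs
      exact ((mem_indices_iff matrix s).mp hs).2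
    · intro pp _ s hadj hspos
      exact (mem_indices_iff matrix s).mpr ⟨gc_ne_zero (by omega), hspos⟩
    · exact hqne
    · omega
    · omega
  · rw [if_neg hpos]
    have hq : indices_of_positive_values matrix = [] := by
      rw [List.eq_nil_iff_forall_not_mem]
      intro x hx
      exact hpos ((any_iff matrix).mpr ⟨x, (mem_indices_iff matrix x).mp hx⟩)
    rw [hq, outer_nil]
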